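-- pv_equiv track=rewrite | github.com/JasonFeng365/BuildYourOwnLabyrinth | helper/LatexFromMD.py | replaceCode
-- ===== SOURCE A (Python) =====
-- codePrefix = "\\texttt{"
--
-- suffix = "}"
--
-- def replaceCode(line):
-- 	stars = []
-- 	for i in range(len(line)):
-- 		if line[i]=='`': stars.append(i)
--
-- 	l = 0
-- 	count = 0
--
-- 	res = ""
-- 	for i in stars:
-- 		res += line[l:i]
-- 		count+=1
-- 		if count%2: res += codePrefix
-- 		else: res += suffix
-- 		l = i+1
-- 	res += line[l:]
-- 	return res
-- ===== SOURCE B (Python) =====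
-- codePrefix = "\\texttt{"
--
-- suffix = "}"
--
-- def replaceCode(line):
--     out = []
--     inCode = False
--     for ch in line:
--         if ch == '`':
--             out.append(suffix if inCode else codePrefix)
--             inCode = not inCode
--         else:
--             out.append(ch)
--     return "".join(out)
-- ===== Notes on version B (the rewrite author's own statement) =====
-- stated objective: simpler
-- what changed: Replaces A's two-phase algorithm (collect all backtick indices, then walk them with a cursor, a counter and repeated slicing line[l:i]) with a single pass over the characters carrying an in-code toggle, emitting the prefix/suffix at each backtick and joining the pieces once.
import Mathlib
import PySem

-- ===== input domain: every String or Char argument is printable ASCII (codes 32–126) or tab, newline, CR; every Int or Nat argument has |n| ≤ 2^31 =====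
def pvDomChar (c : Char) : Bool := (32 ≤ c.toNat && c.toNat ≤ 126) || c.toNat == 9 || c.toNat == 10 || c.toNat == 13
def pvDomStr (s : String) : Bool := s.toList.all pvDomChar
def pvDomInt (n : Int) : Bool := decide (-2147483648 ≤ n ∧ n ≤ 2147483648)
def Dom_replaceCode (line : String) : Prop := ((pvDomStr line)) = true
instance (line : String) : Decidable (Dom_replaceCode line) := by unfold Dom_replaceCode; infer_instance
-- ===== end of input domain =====

-- B replaces A's two-phase "collect backtick positions, then slice between them" with a
-- single pass over the characters carrying an in-code toggle (objective: simpler).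

-- ===== PORT A =====
-- A: collect the indices of all '`' (stars), then walk them keeping a cursor l,
-- a counter and an accumulated result built from slices line[l:i].
def replaceCodeStep (cs : List Char) (st : Int × Int × List Char) (i : Int) :
    Int × Int × List Char :=
  let res := st.2.2 ++ PySem.List.slice cs (some st.1) (some i)
  let count := st.2.1 + 1
  let res := res ++ (if PySem.Int.mod count 2 ≠ 0 then "\\texttt{".toList else "}".toList)
  (i + 1, count, res)

def replaceCode (line : String) : String :=
  let cs := line.toList
  let stars : List Int :=
    (PySem.List.pyRange 0 (PySem.Str.len line) 1).foldl
      (fun acc i => if PySem.List.pyGetD cs i ' ' = '`' then acc ++ [i] else acc) []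
  let st := stars.foldl (replaceCodeStep cs) (0, 0, [])
  String.ofList (st.2.2 ++ PySem.List.slice cs (some st.1) none)

-- ===== PORT B =====
-- B: one pass with a toggle; "".join of the collected pieces is their concatenation (flatten).
def replaceCodeAltStep (st : List (List Char) × Bool) (ch : Char) : List (List Char) × Bool :=
  if ch = '`' then (st.1 ++ [if st.2 then "}".toList else "\\texttt{".toList], !st.2)
  else (st.1 ++ [[ch]], st.2)

def replaceCode_alt (line : String) : String :=
  let st := line.toList.foldl replaceCodeAltStep ([], false)
  String.ofList st.1.flatten

-- ===== PRECONDITION & SPEC =====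
def Spec_replaceCode (line : String) (out : String) : Prop := out = replaceCode_alt line
instance (line : String) (out : String) : Decidable (Spec_replaceCode line out) := by unfold Spec_replaceCode; infer_instance

-- ===== CLAIM (what is proved, stated in full; the proofs are below) =====
def Claim_equal_replaceCode : Prop := ∀ (line : String), Dom_replaceCode line → Spec_replaceCode line (replaceCode line)

-- ===== LEMMAS AND PROOFS =====

-- canonical single-pass description both ports are reduced to
def goSpec : List Char → Bool → List Char
  | [], _ => []
  | c :: cs, b =>
    if c = '`' then (if b then "}".toList else "\\texttt{".toList) ++ goSpec cs (!b)
    else c :: goSpec cs b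

-- the Int positions of '`' in cs, offset by o
def starsOf : List Char → Nat → List Int
  | [], _ => []
  | c :: cs, o => (if c = '`' then [(o : Int)] else []) ++ starsOf cs (o + 1)

theorem starsOf_cons_tick (cs : List Char) (o : Nat) :
    starsOf ('`' :: cs) o = (o : Int) :: starsOf cs (o + 1) := by
  simp [starsOf]

theorem goSpec_cons_tick (cs : List Char) (b : Bool) :
    goSpec ('`' :: cs) b = (if b then "}".toList else "\\texttt{".toList) ++ goSpec cs (!b) := by
  simp [goSpec]

theorem filter_pyRange_eq_starsOf (pre cs : List Char) (d : Char) :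
    (PySem.List.pyRange (pre.length : Int) ((pre ++ cs).length : Int) 1).filter
      (fun i => decide (PySem.List.pyGetD (pre ++ cs) i d = '`')) = starsOf cs pre.length := by
  induction cs generalizing pre with
  | nil =>
    rw [PySem.List.pyRange_one_eq_nil (by simp)]
    simp [starsOf]
  | cons c cs ih =>
    have h1 : (pre.length : Int) < ((pre ++ c :: cs).length : Int) := by
      simp
    have hget : PySem.List.pyGetD (pre ++ c :: cs) (pre.length : Int) d = c := by
      rw [PySem.List.pyGetD_natCast]
      simp [List.getD_eq_getElem?_getD]
    have ih' := ih (pre ++ [c])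
    simp only [List.append_assoc, List.singleton_append, List.length_append,
      List.length_cons, List.length_nil] at ih'
    have hgoal : (PySem.List.pyRange ((pre.length : Int) + 1)
        ((pre.length : Int) + ((cs.length : Int) + 1)) 1).filter
        (fun i => decide (PySem.List.pyGetD (pre ++ c :: cs) i d = '`')) =
        starsOf cs (pre.length + 1) := by
      convert ih' using 3
    rw [PySem.List.pyRange_one_cons h1, List.filter_cons]
    by_cases hc : c = '`'
    · subst hc
      simp [starsOf, hget, hgoal]
    · simp [starsOf, hget, hc, hgoal]

theorem loopA_eq_goSpec (cs pre mid : List Char) (hmid : ∀ c ∈ mid, c ≠ '`')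
    (count : Nat) (res : List Char) :
    (let st := (starsOf cs (pre.length + mid.length)).foldl
        (replaceCodeStep (pre ++ mid ++ cs)) ((pre.length : Int), (count : Int), res)
     st.2.2 ++ PySem.List.slice (pre ++ mid ++ cs) (some st.1) none) =
      res ++ mid ++ goSpec cs (decide (count % 2 = 1)) := by
  induction cs generalizing pre mid count res with
  | nil =>
    simp only [starsOf, List.foldl_nil]
    rw [PySem.List.slice_from_natCast]
    simp [goSpec]
  | cons c cs ih =>
    by_cases hc : c = '`'
    · subst hc
      rw [starsOf_cons_tick]
      simp only [List.foldl_cons, List.append_assoc]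
      have hslice : PySem.List.slice (pre ++ (mid ++ '`' :: cs)) (some (pre.length : Int))
          (some ((pre.length + mid.length : Nat) : Int)) = mid := by
        rw [PySem.List.slice_natCast]
        rw [show pre ++ (mid ++ '`' :: cs) = pre ++ mid ++ '`' :: cs by simp]
        simp
      have hstep : replaceCodeStep (pre ++ (mid ++ '`' :: cs))
          ((pre.length : Int), (count : Int), res) ((pre.length + mid.length : Nat) : Int) =
          (((pre.length + mid.length + 1 : Nat) : Int), ((count + 1 : Nat) : Int),
            res ++ (mid ++ (if (count + 1) % 2 = 1 then "\\texttt{".toList else "}".toList))) := by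
        simp only [replaceCodeStep, hslice]
        have hm : PySem.Int.mod ((count : Int) + 1) 2 = (((count + 1) % 2 : Nat) : Int) := by
          rw [show ((count : Int) + 1) = (((count + 1 : Nat)) : Int) by push_cast; ring]
          exact_mod_cast PySem.Int.mod_natCast (count + 1) 2
        simp only [Prod.mk.injEq, hm, List.append_assoc]
        refine ⟨by push_cast; ring, by push_cast; ring, ?_⟩
        by_cases h2 : (count + 1) % 2 = 1
        · simp [h2]
        · have h0 : (count + 1) % 2 = 0 := by omega
          simp [h0]
      rw [hstep]
      have ih2 := ih (pre ++ mid ++ ['`']) [] (by simp) (count + 1)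
        (res ++ (mid ++ (if (count + 1) % 2 = 1 then "\\texttt{".toList else "}".toList)))
      simp only [List.append_assoc, List.singleton_append, List.append_nil,
        List.length_append, List.length_cons, List.length_nil, Nat.zero_add,
        Nat.add_zero] at ih2
      rw [show pre.length + (mid.length + 1) = pre.length + mid.length + 1 by omega] at ih2
      rw [ih2, goSpec_cons_tick]
      by_cases h2 : count % 2 = 1
      · have h0 : (count + 1) % 2 = 0 := by omega
        simp [h2, h0]
      · have h1' : (count + 1) % 2 = 1 := by omega
        simp [h2, h1']
    · have hpos : starsOf (c :: cs) (pre.length + mid.length) =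
          starsOf cs (pre.length + mid.length + 1) := by
        simp [starsOf, hc]
      rw [hpos]
      have ih' := ih pre (mid ++ [c])
        (by intro x hx; rcases List.mem_append.mp hx with h | h
            · exact hmid x h
            · simp at h; subst h; exact hc) count res
      simp only [List.append_assoc, List.singleton_append, List.length_append,
        List.length_cons, List.length_nil, Nat.zero_add] at ih' ⊢
      rw [show pre.length + (mid.length + 1) = pre.length + mid.length + 1 by omega] at ih'
      rw [ih']
      simp [goSpec, hc]

theorem loopB_eq_goSpec (cs : List Char) (acc : List (List Char)) (b : Bool) :
    ((cs.foldl replaceCodeAltStep (acc, b)).1).flatten = acc.flatten ++ goSpec cs b := by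
  induction cs generalizing acc b with
  | nil => simp [goSpec]
  | cons c cs ih =>
    by_cases hc : c = '`' <;>
      simp [replaceCodeAltStep, hc, ih, goSpec]

-- ===== VERDICT (by name: the statement is the Claim_ definition above) =====
theorem replaceCode_spec : Claim_equal_replaceCode := by
  intro line _
  unfold Spec_replaceCode replaceCode replaceCode_alt
  have hstars : (PySem.List.pyRange 0 (PySem.Str.len line) 1).foldl
      (fun acc i => if PySem.List.pyGetD line.toList i ' ' = '`' then acc ++ [i] else acc) [] =
      starsOf line.toList 0 := by
    rw [show (PySem.List.pyRange 0 (PySem.Str.len line) 1).foldl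
        (fun acc i => if PySem.List.pyGetD line.toList i ' ' = '`' then acc ++ [i] else acc) [] =
        (PySem.List.pyRange 0 (PySem.Str.len line) 1).filter
          (fun i => decide (PySem.List.pyGetD line.toList i ' ' = '`')) by
      rw [show (fun (acc : List Int) i => if PySem.List.pyGetD line.toList i ' ' = '`'
            then acc ++ [i] else acc) =
          (fun acc i => if (fun j => decide (PySem.List.pyGetD line.toList j ' ' = '`')) i = true
            then acc ++ [(id i : Int)] else acc) by
        funext acc i; simp]
      rw [PySem.List.foldl_append_if]
      simp]
    have := filter_pyRange_eq_starsOf [] line.toList ' '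
    simpa [PySem.Str.len_eq] using this
  have hA := loopA_eq_goSpec line.toList [] [] (by simp) 0 []
  simp only [List.length_nil, List.nil_append, Nat.add_zero, Nat.cast_zero] at hA
  have hB := loopB_eq_goSpec line.toList [] false
  simp only [hstars]
  rw [hA, hB]
  simp
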